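-- pv_equiv track=rewrite | github.com/gustavomotadev/mata52-packing | packing.py | calcular_percurso
-- ===== SOURCE A (Python) =====
-- from enum import IntEnum
--
-- class TipoBloco(IntEnum):
--     VAZIO = 0           #fora da area designada
--     DISPONIVEL = 1      #disponivel para ser preenchido
--     PREENCHIDO = 2      #ja preenchido
--     BURACO = 3          #buraco que nao foi possivel de ser preenchido
--     IMPOSSIVEL = 4      #buraco que não poderia ser preenchido de nenhuma maneira
--
-- paridade_dict = {
--     0: [(0, 0), (0, 1), (1, 0), (1, 1)],
--     1: [(0, 0), (0, -1), (1, 0), (1, -1)],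
--     2: [(0, 0), (0, 1), (-1, 0), (-1, 1)],
--     3: [(0, 0), (0, -1), (-1, 0), (-1, -1)]
-- }
--
-- def dentro(largura, altura, x, y):
--     if x < 0 or y < 0 or not x < largura or not y < altura:
--         return False
--     else:
--         return True
--
-- def paridade(matriz, largura, altura, par, x, y):
--
--     for celula in paridade_dict[par]:
--         if (not dentro(largura, altura, celula[1]+x, celula[0]+y) or
--             matriz[celula[0]+y][celula[1]+x] != TipoBloco.DISPONIVEL):
--             return False
--
--     return True
--
-- def preencher(matriz, par, x, y):
--     for celula in paridade_dict[par]: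
--         matriz[celula[0]+y][celula[1]+x] = TipoBloco.PREENCHIDO
--
-- def preencher_percurso(matriz, largura, altura, percurso, par):
--     soma = 0
--
--     for point in percurso:
--         if paridade(matriz, largura, altura, par, point[0], point[1]):
--             preencher(matriz, par, point[0], point[1])
--             soma += 1
--
--     return soma
--
-- def calcular_percurso(matriz, largura, altura, percurso):
--
--     soma = [0, 0, 0, 0]
--
--     matrizes = [[[None for _ in range(largura)] for __ in range(altura)] for ___ in range(4)]
--
--     for p in range(4):
--         for y in range(altura):
--             for x in range(largura):
--                 matrizes[p][y][x] = int(matriz[y][x])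
--
--         soma[p] = preencher_percurso(matrizes[p], largura, altura, percurso, p)
--
--     return soma
-- ===== SOURCE B (Python) =====
-- def colocar(matriz, largura, altura, S, c, ty, tx):
--     # place the 2x2 block whose TOP-LEFT corner is (ty, tx) if it fits:
--     # block in bounds, its four ORIGINAL cells available (== DISPONIVEL == 1),
--     # and no earlier block overlaps it -- two 2x2 blocks overlap exactly when
--     # their top-left corners are within Chebyshev distance 1.
--     if (0 <= tx and tx + 1 < largura and 0 <= ty and ty + 1 < altura
--             and int(matriz[ty][tx]) == 1 and int(matriz[ty][tx + 1]) == 1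
--             and int(matriz[ty + 1][tx]) == 1 and int(matriz[ty + 1][tx + 1]) == 1
--             and not any((ty + dy, tx + dx) in S
--                         for dy in (-1, 0, 1) for dx in (-1, 0, 1))):
--         return (S | {(ty, tx)}, c + 1)
--     return (S, c)
--
-- def calcular_percurso(matriz, largura, altura, percurso):
--     # ONE pass over the path, all four parities at once; per parity only the
--     # top-left corners of the placed blocks are kept (no grid copies, no
--     # per-cell bookkeeping): a candidate block is normalised to its top-left
--     # corner and tested against the original matrix plus the corner set.
--     estados = [(set(), 0)] * 4
--     for (x, y) in percurso:
--         estados = [colocar(matriz, largura, altura, S, c, ty, tx)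
--                    for (S, c), (ty, tx) in
--                    zip(estados, ((y, x), (y, x - 1), (y - 1, x), (y - 1, x - 1)))]
--     return [c for (_, c) in estados]
-- ===== Notes on version B (the rewrite author's own statement) =====
-- stated objective: alternative
-- what changed: B makes a single pass over the path handling all four parities at once and represents each parity's placed blocks only by the TOP-LEFT corners of the 2x2 blocks, testing a candidate by block bounds, the four original matrix cells, and corner adjacency (two 2x2 blocks overlap iff their corners are within Chebyshev distance 1) - no grid is copied or mutated and no per-cell bookkeeping is kept.
import Mathlib
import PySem

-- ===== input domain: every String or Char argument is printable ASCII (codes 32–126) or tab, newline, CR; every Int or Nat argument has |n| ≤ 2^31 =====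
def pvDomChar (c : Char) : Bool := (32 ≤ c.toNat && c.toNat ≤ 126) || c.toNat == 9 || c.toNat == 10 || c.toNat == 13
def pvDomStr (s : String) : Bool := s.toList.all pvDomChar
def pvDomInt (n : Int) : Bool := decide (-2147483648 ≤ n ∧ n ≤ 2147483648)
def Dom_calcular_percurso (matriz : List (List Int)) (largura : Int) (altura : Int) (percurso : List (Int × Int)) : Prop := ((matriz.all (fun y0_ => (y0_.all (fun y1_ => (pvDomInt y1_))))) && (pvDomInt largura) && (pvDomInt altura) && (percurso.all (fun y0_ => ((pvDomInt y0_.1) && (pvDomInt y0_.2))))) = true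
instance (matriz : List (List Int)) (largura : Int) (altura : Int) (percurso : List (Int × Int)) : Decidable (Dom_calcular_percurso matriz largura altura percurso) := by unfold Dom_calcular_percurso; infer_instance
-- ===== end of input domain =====

-- B walks the path once, handling all four parities together, and keeps per parity only the
-- top-left corners of the placed 2x2 blocks (overlap = corner within Chebyshev distance 1),
-- instead of copying and mutating four full grids (objective: alternative; return value only).


-- ===== PORT A =====
-- paridade_dict
def pvParidadeDict : PySem.Dict Int (List (Int × Int)) := PySem.Dict.ofList
  [(0, [((0:Int), (0:Int)), (0, 1), (1, 0), (1, 1)]),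
   (1, [(0, 0), (0, -1), (1, 0), (1, -1)]),
   (2, [(0, 0), (0, 1), (-1, 0), (-1, 1)]),
   (3, [(0, 0), (0, -1), (-1, 0), (-1, -1)])]

-- dentro(largura, altura, x, y)
def pvDentro (largura altura x y : Int) : Bool :=
  if x < 0 || y < 0 || !(x < largura) || !(y < altura) then false else true

-- matriz[y][x]; in A it is only evaluated after `dentro` succeeded, so the
-- indices are nonnegative and in range and pyGetD is exact there.
def pvCellA (grid : List (List Int)) (y x : Int) : Int :=
  PySem.List.pyGetD (PySem.List.pyGetD grid y []) x 0

-- paridade(matriz, largura, altura, par, x, y): the early-return loop is the all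
def pvParidade (grid : List (List Int)) (largura altura par x y : Int) : Bool :=
  (pvParidadeDict.getD par []).all (fun c =>
    pvDentro largura altura (c.2 + x) (c.1 + y) && (pvCellA grid (c.1 + y) (c.2 + x) == 1))

-- preencher: matriz[cy][cx] = PREENCHIDO (= 2); only called where dentro held
def pvPreencher (grid : List (List Int)) (par x y : Int) : List (List Int) :=
  (pvParidadeDict.getD par []).foldl
    (fun g c =>
      PySem.List.pySetD g (c.1 + y)
        (PySem.List.pySetD (PySem.List.pyGetD g (c.1 + y) []) (c.2 + x) 2)) grid

-- preencher_percurso: loop over percurso carrying (mutated grid, soma)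
def pvPreencherPercurso (grid : List (List Int)) (largura altura : Int)
    (percurso : List (Int × Int)) (par : Int) : List (List Int) × Int :=
  percurso.foldl (fun st pt =>
    if pvParidade st.1 largura altura par pt.1 pt.2 then
      (pvPreencher st.1 par pt.1 pt.2, st.2 + 1)
    else st) (grid, 0)

-- the per-parity copy: A allocates a None grid and fills cell (y,x) with
-- int(matriz[y][x]) for y in range(altura), x in range(largura) (int is the
-- identity on ints); ported as the resulting altura × largura grid of values
def pvCopia (matriz : List (List Int)) (largura altura : Int) : List (List Int) :=
  (PySem.List.pyRange 0 altura 1).map (fun y =>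
    (PySem.List.pyRange 0 largura 1).map (fun x => pvCellA matriz y x))

def calcular_percurso (matriz : List (List Int)) (largura : Int) (altura : Int) (percurso : List (Int × Int)) : List Int :=
  (PySem.List.pyRange 0 4 1).map (fun p =>
    (pvPreencherPercurso (pvCopia matriz largura altura) largura altura percurso p).2)

-- ===== PORT B =====
-- matriz[ty][tx] of Source B: only reached after the block-bounds conjuncts, where it is exact
def pvCellB (matriz : List (List Int)) (y x : Int) : Int :=
  PySem.List.pyGetD (PySem.List.pyGetD matriz y []) x 0

-- colocar's condition: block at top-left (ty,tx) in bounds, four original cells == 1,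
-- and no placed corner within Chebyshev distance 1 (the any-over-9-neighbours test)
def pvCabe (matriz : List (List Int)) (largura altura : Int)
    (S : PySem.Set (Int × Int)) (ty tx : Int) : Bool :=
  decide (0 ≤ tx) && decide (tx + 1 < largura) && decide (0 ≤ ty) && decide (ty + 1 < altura) &&
  (pvCellB matriz ty tx == 1) && (pvCellB matriz ty (tx + 1) == 1) &&
  (pvCellB matriz (ty + 1) tx == 1) && (pvCellB matriz (ty + 1) (tx + 1) == 1) &&
  !(([-1, 0, 1] : List Int).any (fun dy => ([-1, 0, 1] : List Int).any (fun dx =>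
      PySem.Set.contains S (ty + dy, tx + dx))))

-- colocar(matriz, largura, altura, S, c, ty, tx)
def pvColocar (matriz : List (List Int)) (largura altura : Int)
    (S : PySem.Set (Int × Int)) (c : Int) (ty tx : Int) : PySem.Set (Int × Int) × Int :=
  if pvCabe matriz largura altura S ty tx then (PySem.Set.add S (ty, tx), c + 1) else (S, c)

-- the tuple ((y,x),(y,x-1),(y-1,x),(y-1,x-1)) zipped with estados
def pvCantos (x y : Int) : List (Int × Int) := [(y, x), (y, x - 1), (y - 1, x), (y - 1, x - 1)]

def calcular_percurso_alt (matriz : List (List Int)) (largura : Int) (altura : Int) (percurso : List (Int × Int)) : List Int :=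
  (percurso.foldl
    (fun (estados : List (PySem.Set (Int × Int) × Int)) pt =>
      List.zipWith (fun st t => pvColocar matriz largura altura st.1 st.2 t.1 t.2)
        estados (pvCantos pt.1 pt.2))
    (List.replicate 4 (PySem.Set.empty, 0))).map Prod.snd

-- ===== PRECONDITION & SPEC =====
-- A raises IndexError while copying the matrix unless (when both dimensions are
-- positive) matriz has at least altura rows whose first altura rows each have at
-- least largura entries; Pre_ excludes exactly those raising inputs.  (The two total
-- Lean ports happen to agree even outside Pre_, so the proof does not consume it.)
def Pre_calcular_percurso (matriz : List (List Int)) (largura : Int) (altura : Int) (percurso : List (Int × Int)) : Prop :=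
  0 < largura → 0 < altura →
    altura ≤ (matriz.length : Int) ∧ ∀ row ∈ matriz.take altura.toNat, largura ≤ (row.length : Int)
instance (matriz : List (List Int)) (largura : Int) (altura : Int) (percurso : List (Int × Int)) : Decidable (Pre_calcular_percurso matriz largura altura percurso) := by unfold Pre_calcular_percurso; infer_instance

def pvWitness_calcular_percurso : List (List Int) × Int × Int × (List (Int × Int)) :=
  ([[1, 1, 1], [1, 1, 0]], 3, 2, [(0, 0), (1, 0), (2, 1)])

def Spec_calcular_percurso (matriz : List (List Int)) (largura : Int) (altura : Int) (percurso : List (Int × Int)) (out : List Int) : Prop := out = calcular_percurso_alt matriz largura altura percurso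
instance (matriz : List (List Int)) (largura : Int) (altura : Int) (percurso : List (Int × Int)) (out : List Int) : Decidable (Spec_calcular_percurso matriz largura altura percurso out) := by unfold Spec_calcular_percurso; infer_instance

-- ===== CLAIM (what is proved, stated in full; the proofs are below) =====
def Claim_equal_calcular_percurso : Prop := ∀ (matriz : List (List Int)) (largura : Int) (altura : Int) (percurso : List (Int × Int)), Dom_calcular_percurso matriz largura altura percurso → Pre_calcular_percurso matriz largura altura percurso → Spec_calcular_percurso matriz largura altura percurso (calcular_percurso matriz largura altura percurso)

-- ===== LEMMAS AND PROOFS =====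

-- dimensions of A's working grid
def pvDims (largura altura : Int) (g : List (List Int)) : Prop :=
  g.length = altura.toNat ∧ ∀ row ∈ g, row.length = largura.toNat

-- "(y,x) is covered by a block whose top-left corner is in S"
def pvCovB (S : PySem.Set (Int × Int)) (y x : Int) : Bool :=
  S.any (fun t => decide (t.1 ≤ y ∧ y ≤ t.1 + 1 ∧ t.2 ≤ x ∧ x ≤ t.2 + 1))

-- the coupling invariant between A's mutated grid and B's (original matrix, corner set)
def pvInv (matriz : List (List Int)) (largura altura : Int)
    (grid : List (List Int)) (S : PySem.Set (Int × Int)) : Prop :=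
  pvDims largura altura grid ∧
  (∀ y x : Int, 0 ≤ y → y < altura → 0 ≤ x → x < largura →
    pvCellA grid y x = if pvCovB S y x then 2 else pvCellA matriz y x)

-- the four cells A touches for parity par at point (x,y), as (row, col) pairs
def pvCellsP (par x y : Int) : List (Int × Int) :=
  (pvParidadeDict.getD par []).map (fun c => (c.1 + y, c.2 + x))

-- one assignment matriz[cy][cx] = 2 of A, as a function
def pvSetCell (g : List (List Int)) (cy cx : Int) : List (List Int) :=
  PySem.List.pySetD g cy (PySem.List.pySetD (PySem.List.pyGetD g cy []) cx 2)

def pvFill (g : List (List Int)) (L : List (Int × Int)) : List (List Int) :=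
  L.foldl (fun g c => pvSetCell g c.1 c.2) g

theorem pvPreencher_eq_fill (g : List (List Int)) (par x y : Int) :
    pvPreencher g par x y = pvFill g (pvCellsP par x y) := by
  simp [pvPreencher, pvFill, pvCellsP, pvSetCell, List.foldl_map]

theorem pv_cell_setCell {largura altura : Int} {g : List (List Int)} (hd : pvDims largura altura g)
    {cy cx : Int} (h1 : 0 ≤ cy) (h2 : cy < altura) (h3 : 0 ≤ cx) (h4 : cx < largura) :
    pvDims largura altura (pvSetCell g cy cx) ∧
    ∀ y x : Int, 0 ≤ y → y < altura → 0 ≤ x → x < largura →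
      pvCellA (pvSetCell g cy cx) y x = if y = cy ∧ x = cx then 2 else pvCellA g y x := by
  obtain ⟨hl, hr⟩ := hd
  have hcy : cy.toNat < g.length := by omega
  have hrow : PySem.List.pyGetD g cy [] = g[cy.toNat] :=
    PySem.List.pyGetD_eq_getElem g [] h1 (by omega)
  have hrlen : (g[cy.toNat]).length = largura.toNat := hr _ (List.getElem_mem hcy)
  have hset : pvSetCell g cy cx = g.set cy.toNat ((g[cy.toNat]).set cx.toNat 2) := by
    rw [pvSetCell, hrow, PySem.List.pySetD_of_nonneg _ _ h3, PySem.List.pySetD_of_nonneg _ _ h1]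
  constructor
  · refine ⟨by rw [hset]; simpa using hl, ?_⟩
    intro row hrow'
    rw [hset] at hrow'
    rcases List.mem_or_eq_of_mem_set hrow' with h | h
    · exact hr _ h
    · subst h; simpa using hrlen
  · intro y x hy1 hy2 hx1 hx2
    have hyl : y.toNat < g.length := by omega
    have houter : pvCellA (pvSetCell g cy cx) y x =
        PySem.List.pyGetD
          ((g.set cy.toNat ((g[cy.toNat]).set cx.toNat 2))[y.toNat]'(by
            rw [List.length_set]; omega)) x 0 := by
      rw [pvCellA, hset,
        PySem.List.pyGetD_eq_getElem _ [] hy1 (by rw [List.length_set]; omega)]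
    rw [houter, List.getElem_set]
    by_cases hyc : y = cy
    · subst hyc
      rw [if_pos rfl]
      have hxl : x.toNat < (g[y.toNat]).length := by rw [hrlen]; omega
      rw [PySem.List.pyGetD_eq_getElem _ 0 hx1 (by rw [List.length_set]; omega),
        List.getElem_set]
      by_cases hxc : x = cx
      · subst hxc; simp
      · have : ¬ cx.toNat = x.toNat := by omega
        rw [if_neg this, if_neg (by tauto)]
        rw [pvCellA, hrow, PySem.List.pyGetD_eq_getElem _ 0 hx1 (by omega)]
    · have hne : ¬ cy.toNat = y.toNat := by omega
      rw [if_neg hne, if_neg (by tauto), pvCellA,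
        PySem.List.pyGetD_eq_getElem g [] hy1 (by omega)]

theorem pv_fill_inv {largura altura : Int} :
    ∀ (L : List (Int × Int)) (g : List (List Int)), pvDims largura altura g →
    (∀ c ∈ L, 0 ≤ c.1 ∧ c.1 < altura ∧ 0 ≤ c.2 ∧ c.2 < largura) →
    pvDims largura altura (pvFill g L) ∧
    ∀ y x : Int, 0 ≤ y → y < altura → 0 ≤ x → x < largura →
      pvCellA (pvFill g L) y x = if (y, x) ∈ L then 2 else pvCellA g y x := by
  intro L
  induction L with
  | nil => intro g hd _; exact ⟨hd, by simp [pvFill]⟩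
  | cons c L ih =>
    intro g hd hin
    obtain ⟨hc1, hc2, hc3, hc4⟩ := hin c (by simp)
    obtain ⟨hd', hcell'⟩ := pv_cell_setCell hd hc1 hc2 hc3 hc4
    have hfill : pvFill g (c :: L) = pvFill (pvSetCell g c.1 c.2) L := rfl
    obtain ⟨hdf, hcf⟩ := ih (pvSetCell g c.1 c.2) hd' (fun c' hc' => hin c' (by simp [hc']))
    refine ⟨by rwa [hfill], ?_⟩
    intro y x hy1 hy2 hx1 hx2
    rw [hfill, hcf y x hy1 hy2 hx1 hx2, hcell' y x hy1 hy2 hx1 hx2]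
    have hpc : ((y, x) = c) ↔ (y = c.1 ∧ x = c.2) := by
      cases c; simp [Prod.ext_iff]
    by_cases hm : (y, x) ∈ L
    · simp [hm]
    · by_cases he : (y, x) = c <;> simp [hm, he, List.mem_cons] <;> tauto

-- pvCovB unfolded to the exists it means
theorem pv_covB_iff (S : PySem.Set (Int × Int)) (y x : Int) :
    pvCovB S y x = true ↔ ∃ t ∈ S, t.1 ≤ y ∧ y ≤ t.1 + 1 ∧ t.2 ≤ x ∧ x ≤ t.2 + 1 := by
  simp [pvCovB, List.any_eq_true]

theorem pv_dentro_iff (largura altura cx cy : Int) :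
    pvDentro largura altura cx cy = true ↔ 0 ≤ cx ∧ cx < largura ∧ 0 ≤ cy ∧ cy < altura := by
  unfold pvDentro
  split_ifs with h <;>
    simp only [Bool.or_eq_true, Bool.not_eq_true', decide_eq_true_eq,
      decide_eq_false_iff_not] at h <;>
    simp only [false_iff, true_iff] <;>
    omega

-- A's check for parity par at (x,y) equals B's pvCabe at the matching top-left corner
theorem pv_check {matriz : List (List Int)} {largura altura : Int}
    {grid : List (List Int)} {S : PySem.Set (Int × Int)}
    (hinv : ∀ y x : Int, 0 ≤ y → y < altura → 0 ≤ x → x < largura →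
      pvCellA grid y x = if pvCovB S y x then 2 else pvCellA matriz y x)
    (par x y ty tx : Int)
    (Hmem : ∀ cy cx : Int, (cy, cx) ∈ pvCellsP par x y ↔
      ty ≤ cy ∧ cy ≤ ty + 1 ∧ tx ≤ cx ∧ cx ≤ tx + 1) :
    pvParidade grid largura altura par x y = pvCabe matriz largura altura S ty tx := by
  have hAform : pvParidade grid largura altura par x y =
      (pvCellsP par x y).all (fun c =>
        pvDentro largura altura c.2 c.1 && (pvCellA grid c.1 c.2 == 1)) := by
    rw [pvParidade, pvCellsP, List.all_map]
    rfl
  rw [hAform, Bool.eq_iff_iff, List.all_eq_true]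
  constructor
  · intro hall
    -- bounds from the two extreme cells
    have h00 := hall (ty, tx) ((Hmem ty tx).mpr (by omega))
    have h11 := hall (ty + 1, tx + 1) ((Hmem (ty + 1) (tx + 1)).mpr (by omega))
    simp only [Bool.and_eq_true] at h00 h11
    obtain ⟨hb00, -⟩ := h00
    obtain ⟨hb11, -⟩ := h11
    rw [pv_dentro_iff] at hb00 hb11
    have hbnd : 0 ≤ tx ∧ tx + 1 < largura ∧ 0 ≤ ty ∧ ty + 1 < altura := by omega
    -- each block cell: original is 1 and not covered
    have hcell : ∀ cy cx : Int, ty ≤ cy → cy ≤ ty + 1 → tx ≤ cx → cx ≤ tx + 1 →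
        pvCellA matriz cy cx = 1 ∧ pvCovB S cy cx = false := by
      intro cy cx h1 h2 h3 h4
      have hc := hall (cy, cx) ((Hmem cy cx).mpr ⟨h1, h2, h3, h4⟩)
      simp only [Bool.and_eq_true, beq_iff_eq] at hc
      obtain ⟨-, hval⟩ := hc
      rw [hinv cy cx (by omega) (by omega) (by omega) (by omega)] at hval
      by_cases hcov : pvCovB S cy cx = true
      · rw [if_pos hcov] at hval; omega
      · rw [if_neg hcov] at hval
        exact ⟨hval, by simpa using hcov⟩
    -- no placed corner in the 9-neighbourhood
    have hno : (([-1, 0, 1] : List Int).any (fun dy => ([-1, 0, 1] : List Int).any (fun dx =>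
        PySem.Set.contains S (ty + dy, tx + dx)))) = false := by
      rw [List.any_eq_false]
      intro dy hdy
      rw [Bool.not_eq_true, List.any_eq_false]
      intro dx hdx
      simp only [List.mem_cons, List.not_mem_nil, or_false] at hdy hdx
      rw [Bool.not_eq_true, Bool.eq_false_iff]
      intro hcont
      rw [PySem.Set.contains_iff] at hcont
      have hcy : ty ≤ max ty (ty + dy) ∧ max ty (ty + dy) ≤ ty + 1 ∧
          ty + dy ≤ max ty (ty + dy) ∧ max ty (ty + dy) ≤ ty + dy + 1 := by
        rcases hdy with h | h | h <;> subst h <;> omega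
      have hcx : tx ≤ max tx (tx + dx) ∧ max tx (tx + dx) ≤ tx + 1 ∧
          tx + dx ≤ max tx (tx + dx) ∧ max tx (tx + dx) ≤ tx + dx + 1 := by
        rcases hdx with h | h | h <;> subst h <;> omega
      have hcovf := (hcell (max ty (ty + dy)) (max tx (tx + dx))
        hcy.1 hcy.2.1 hcx.1 hcx.2.1).2
      rw [Bool.eq_false_iff] at hcovf
      exact hcovf ((pv_covB_iff _ _ _).mpr
        ⟨(ty + dy, tx + dx), hcont, hcy.2.2.1, hcy.2.2.2, hcx.2.2.1, hcx.2.2.2⟩)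
    unfold pvCabe
    simp only [Bool.and_eq_true, decide_eq_true_eq, beq_iff_eq, Bool.not_eq_true']
    have hcB : ∀ cy cx, pvCellB matriz cy cx = pvCellA matriz cy cx := fun _ _ => rfl
    refine ⟨⟨⟨⟨⟨⟨⟨⟨hbnd.1, hbnd.2.1⟩, hbnd.2.2.1⟩, hbnd.2.2.2⟩, ?_⟩, ?_⟩, ?_⟩, ?_⟩, hno⟩
    · rw [hcB]; exact (hcell ty tx (by omega) (by omega) (by omega) (by omega)).1
    · rw [hcB]; exact (hcell ty (tx + 1) (by omega) (by omega) (by omega) (by omega)).1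
    · rw [hcB]; exact (hcell (ty + 1) tx (by omega) (by omega) (by omega) (by omega)).1
    · rw [hcB]; exact (hcell (ty + 1) (tx + 1) (by omega) (by omega) (by omega) (by omega)).1
  · intro hcabe
    unfold pvCabe at hcabe
    simp only [Bool.and_eq_true, decide_eq_true_eq, beq_iff_eq, Bool.not_eq_true'] at hcabe
    obtain ⟨⟨⟨⟨⟨⟨⟨⟨hx1, hx2⟩, hy1⟩, hy2⟩, v00⟩, v01⟩, v10⟩, v11⟩, hno⟩ := hcabe
    rw [List.any_eq_false] at hno
    intro c hc
    obtain ⟨cy, cx⟩ := c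
    obtain ⟨h1, h2, h3, h4⟩ := (Hmem cy cx).mp hc
    have hb : pvDentro largura altura cx cy = true := by
      rw [pv_dentro_iff]; omega
    have hnocov : pvCovB S cy cx = false := by
      rw [Bool.eq_false_iff]
      intro hcov
      obtain ⟨t, htS, ht⟩ := (pv_covB_iff _ _ _).mp hcov
      have hdy : t.1 - ty ∈ ([-1, 0, 1] : List Int) := by
        simp only [List.mem_cons, List.not_mem_nil, or_false]; omega
      have hinner := hno (t.1 - ty) hdy
      rw [Bool.not_eq_true, List.any_eq_false] at hinner
      have hdx : t.2 - tx ∈ ([-1, 0, 1] : List Int) := by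
        simp only [List.mem_cons, List.not_mem_nil, or_false]; omega
      have hfalse := hinner (t.2 - tx) hdx
      rw [Bool.not_eq_true, Bool.eq_false_iff] at hfalse
      apply hfalse
      rw [PySem.Set.contains_iff]
      have heq : (ty + (t.1 - ty), tx + (t.2 - tx)) = t := by
        obtain ⟨a, b⟩ := t; simp only [Prod.mk.injEq]; omega
      rwa [heq]
    have hval : pvCellA matriz cy cx = 1 := by
      have hy : cy = ty ∨ cy = ty + 1 := by omega
      have hx : cx = tx ∨ cx = tx + 1 := by omega
      rcases hy with h | h <;> rcases hx with h' | h' <;> subst h <;> subst h' <;>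
        assumption
    simp only [Bool.and_eq_true, beq_iff_eq]
    refine ⟨hb, ?_⟩
    rw [hinv cy cx (by omega) (by omega) (by omega) (by omega), hnocov, if_neg (by simp)]
    exact hval

-- placing a block preserves the invariant
theorem pv_inv_step {matriz : List (List Int)} {largura altura : Int}
    {grid : List (List Int)} {S : PySem.Set (Int × Int)}
    (hinv : pvInv matriz largura altura grid S) {par x y ty tx : Int}
    (Hmem : ∀ cy cx : Int, (cy, cx) ∈ pvCellsP par x y ↔
      ty ≤ cy ∧ cy ≤ ty + 1 ∧ tx ≤ cx ∧ cx ≤ tx + 1)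
    (hbnd : 0 ≤ tx ∧ tx + 1 < largura ∧ 0 ≤ ty ∧ ty + 1 < altura) :
    pvInv matriz largura altura (pvFill grid (pvCellsP par x y)) (PySem.Set.add S (ty, tx)) := by
  obtain ⟨hd, hcell⟩ := hinv
  have hb : ∀ c ∈ pvCellsP par x y, 0 ≤ c.1 ∧ c.1 < altura ∧ 0 ≤ c.2 ∧ c.2 < largura := by
    intro c hc
    obtain ⟨cy, cx⟩ := c
    have := (Hmem cy cx).mp hc
    simp only
    omega
  obtain ⟨hdf, hcf⟩ := pv_fill_inv (pvCellsP par x y) grid hd hb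
  refine ⟨hdf, ?_⟩
  intro cy cx hy1 hy2 hx1 hx2
  rw [hcf cy cx hy1 hy2 hx1 hx2, hcell cy cx hy1 hy2 hx1 hx2]
  have hcover : pvCovB (PySem.Set.add S (ty, tx)) cy cx = true ↔
      pvCovB S cy cx = true ∨ (cy, cx) ∈ pvCellsP par x y := by
    rw [pv_covB_iff, pv_covB_iff, Hmem]
    constructor
    · rintro ⟨t, htS, ht⟩
      rcases (PySem.Set.mem_add _ _ _).mp htS with h | h
      · exact Or.inl ⟨t, h, ht⟩
      · subst h; right; simpa using ht
    · rintro (⟨t, htS, ht⟩ | h)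
      · exact ⟨t, (PySem.Set.mem_add _ _ _).mpr (Or.inl htS), ht⟩
      · exact ⟨(ty, tx), (PySem.Set.mem_add _ _ _).mpr (Or.inr rfl), by simpa using h⟩
  by_cases hm : (cy, cx) ∈ pvCellsP par x y
  · rw [if_pos hm, if_pos (by rw [hcover]; tauto)]
  · rw [if_neg hm]
    by_cases hc : pvCovB S cy cx = true
    · rw [if_pos hc, if_pos (by rw [hcover]; tauto)]
    · have hnc : ¬ pvCovB (PySem.Set.add S (ty, tx)) cy cx = true := by
        intro h
        rcases hcover.mp h with h' | h'
        · exact hc h'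
        · exact hm h'
      rw [if_neg hc, if_neg hnc]

-- per-parity loop: A's (grid, soma) fold has the same count as B's (corners, count) fold
theorem pv_loop_eq {matriz : List (List Int)} {largura altura par : Int}
    (co : Int × Int → Int × Int)
    (Hmem : ∀ (pt : Int × Int) (cy cx : Int), (cy, cx) ∈ pvCellsP par pt.1 pt.2 ↔
      (co pt).1 ≤ cy ∧ cy ≤ (co pt).1 + 1 ∧ (co pt).2 ≤ cx ∧ cx ≤ (co pt).2 + 1) :
    ∀ (per : List (Int × Int)) (grid : List (List Int))
      (S : PySem.Set (Int × Int)) (k : Int),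
      pvInv matriz largura altura grid S →
      (per.foldl (fun st pt =>
          if pvParidade st.1 largura altura par pt.1 pt.2 then
            (pvPreencher st.1 par pt.1 pt.2, st.2 + 1)
          else st) (grid, k)).2 =
      (per.foldl (fun (st : PySem.Set (Int × Int) × Int) pt =>
          pvColocar matriz largura altura st.1 st.2 (co pt).1 (co pt).2) (S, k)).2 := by
  intro per
  induction per with
  | nil => intro grid S k _; rfl
  | cons pt per ih =>
    intro grid S k hinv
    have hcheck : pvParidade grid largura altura par pt.1 pt.2 =
        pvCabe matriz largura altura S (co pt).1 (co pt).2 :=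
      pv_check hinv.2 par pt.1 pt.2 (co pt).1 (co pt).2 (Hmem pt)
    simp only [List.foldl_cons, pvColocar]
    by_cases h : pvCabe matriz largura altura S (co pt).1 (co pt).2 = true
    · rw [if_pos (by rw [hcheck]; exact h), if_pos h]
      have hbnd : 0 ≤ (co pt).2 ∧ (co pt).2 + 1 < largura ∧
          0 ≤ (co pt).1 ∧ (co pt).1 + 1 < altura := by
        unfold pvCabe at h
        simp only [Bool.and_eq_true, decide_eq_true_eq] at h
        obtain ⟨⟨⟨⟨⟨⟨⟨⟨a1, a2⟩, a3⟩, a4⟩, -⟩, -⟩, -⟩, -⟩, -⟩ := h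
        exact ⟨a1, a2, a3, a4⟩
      rw [pvPreencher_eq_fill]
      exact ih _ _ _ (pv_inv_step hinv (Hmem pt) hbnd)
    · rw [if_neg (by rw [hcheck]; exact h), if_neg h]
      exact ih _ _ _ hinv

theorem pv_copy_inv (matriz : List (List Int)) (largura altura : Int) :
    pvInv matriz largura altura (pvCopia matriz largura altura) PySem.Set.empty := by
  have hrange : ∀ b : Int, PySem.List.pyRange 0 b 1 =
      List.map (fun k : Nat => (k : Int)) (List.range b.toNat) := by
    intro b
    rw [PySem.List.pyRange_of_pos 0 b (by norm_num)]
    congr 1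
    · funext k; simp
    · congr 1
      split <;> omega
  refine ⟨⟨?_, ?_⟩, ?_⟩
  · simp [pvCopia, hrange]
  · intro row hrow
    simp only [pvCopia, hrange, List.mem_map] at hrow
    obtain ⟨k, -, hk⟩ := hrow
    simp [← hk]
  · intro y x hy1 hy2 hx1 hx2
    have hyH : y.toNat < altura.toNat := by omega
    have hxW : x.toNat < largura.toNat := by omega
    have hycast : y = ((y.toNat : Nat) : Int) := by omega
    have hxcast : x = ((x.toNat : Nat) : Int) := by omega
    have hH : altura = ((altura.toNat : Nat) : Int) := by omega
    have hW : largura = ((largura.toNat : Nat) : Int) := by omega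
    have h1 : pvCellA (pvCopia matriz largura altura) y x = pvCellA matriz y x := by
      rw [pvCellA, pvCopia]
      rw [hH, hycast, hxcast]
      rw [show PySem.List.pyRange 0 ((altura.toNat : Nat) : Int) 1 =
        PySem.List.pyRange 0 ((altura.toNat : Nat) : Int) from rfl]
      rw [PySem.List.pyGetD_map_pyRange _ altura.toNat y.toNat [] hyH]
      rw [hW]
      rw [show PySem.List.pyRange 0 ((largura.toNat : Nat) : Int) 1 =
        PySem.List.pyRange 0 ((largura.toNat : Nat) : Int) from rfl]
      rw [PySem.List.pyGetD_map_pyRange _ largura.toNat x.toNat 0 hxW]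
    rw [h1]
    simp [pvCovB, PySem.Set.empty]

-- B's joint fold over a 4-element state list splits into four independent folds
theorem pv_fold_components (matriz : List (List Int)) (largura altura : Int) :
    ∀ (per : List (Int × Int)) (a b c d : PySem.Set (Int × Int) × Int),
      per.foldl
        (fun (estados : List (PySem.Set (Int × Int) × Int)) pt =>
          List.zipWith (fun st t => pvColocar matriz largura altura st.1 st.2 t.1 t.2)
            estados (pvCantos pt.1 pt.2)) [a, b, c, d] =
      [per.foldl (fun st pt => pvColocar matriz largura altura st.1 st.2 pt.2 pt.1) a,
       per.foldl (fun st pt => pvColocar matriz largura altura st.1 st.2 pt.2 (pt.1 - 1)) b,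
       per.foldl (fun st pt => pvColocar matriz largura altura st.1 st.2 (pt.2 - 1) pt.1) c,
       per.foldl (fun st pt => pvColocar matriz largura altura st.1 st.2 (pt.2 - 1) (pt.1 - 1)) d] := by
  intro per
  induction per with
  | nil => intro a b c d; rfl
  | cons pt per ih =>
    intro a b c d
    simp only [List.foldl_cons, pvCantos, List.zipWith]
    exact ih _ _ _ _

-- the Hmem facts for the four parities
theorem pv_mem0 (pt : Int × Int) (cy cx : Int) :
    (cy, cx) ∈ pvCellsP 0 pt.1 pt.2 ↔
      pt.2 ≤ cy ∧ cy ≤ pt.2 + 1 ∧ pt.1 ≤ cx ∧ cx ≤ pt.1 + 1 := by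
  simp only [pvCellsP, show pvParidadeDict.getD 0 [] =
    [((0:Int), (0:Int)), (0, 1), (1, 0), (1, 1)] from rfl, List.map_cons, List.map_nil,
    List.mem_cons, List.not_mem_nil, or_false, Prod.mk.injEq]
  omega

theorem pv_mem1 (pt : Int × Int) (cy cx : Int) :
    (cy, cx) ∈ pvCellsP 1 pt.1 pt.2 ↔
      pt.2 ≤ cy ∧ cy ≤ pt.2 + 1 ∧ pt.1 - 1 ≤ cx ∧ cx ≤ pt.1 - 1 + 1 := by
  simp only [pvCellsP, show pvParidadeDict.getD 1 [] =
    [((0:Int), (0:Int)), (0, -1), (1, 0), (1, -1)] from rfl, List.map_cons, List.map_nil,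
    List.mem_cons, List.not_mem_nil, or_false, Prod.mk.injEq]
  omega

theorem pv_mem2 (pt : Int × Int) (cy cx : Int) :
    (cy, cx) ∈ pvCellsP 2 pt.1 pt.2 ↔
      pt.2 - 1 ≤ cy ∧ cy ≤ pt.2 - 1 + 1 ∧ pt.1 ≤ cx ∧ cx ≤ pt.1 + 1 := by
  simp only [pvCellsP, show pvParidadeDict.getD 2 [] =
    [((0:Int), (0:Int)), (0, 1), (-1, 0), (-1, 1)] from rfl, List.map_cons, List.map_nil,
    List.mem_cons, List.not_mem_nil, or_false, Prod.mk.injEq]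
  omega

theorem pv_mem3 (pt : Int × Int) (cy cx : Int) :
    (cy, cx) ∈ pvCellsP 3 pt.1 pt.2 ↔
      pt.2 - 1 ≤ cy ∧ cy ≤ pt.2 - 1 + 1 ∧ pt.1 - 1 ≤ cx ∧ cx ≤ pt.1 - 1 + 1 := by
  simp only [pvCellsP, show pvParidadeDict.getD 3 [] =
    [((0:Int), (0:Int)), (0, -1), (-1, 0), (-1, -1)] from rfl, List.map_cons, List.map_nil,
    List.mem_cons, List.not_mem_nil, or_false, Prod.mk.injEq]
  omega

-- ===== VERDICT (by name: the statement is the Claim_ definition above) =====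
theorem calcular_percurso_spec : Claim_equal_calcular_percurso := by
  intro matriz largura altura percurso _ _
  unfold Spec_calcular_percurso calcular_percurso calcular_percurso_alt
  rw [show (List.replicate 4 ((PySem.Set.empty : PySem.Set (Int × Int)), (0 : Int))) =
    [(PySem.Set.empty, 0), (PySem.Set.empty, 0), (PySem.Set.empty, 0), (PySem.Set.empty, 0)]
    from rfl]
  rw [pv_fold_components]
  rw [show PySem.List.pyRange 0 4 1 = [(0 : Int), 1, 2, 3] from rfl]
  simp only [List.map_cons, List.map_nil]
  have hinv := pv_copy_inv matriz largura altura
  refine congrArg₂ _ ?_ (congrArg₂ _ ?_ (congrArg₂ _ ?_ (congrArg₂ _ ?_ rfl)))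
  · exact pv_loop_eq (fun pt => (pt.2, pt.1)) pv_mem0 percurso _ _ 0 hinv
  · exact pv_loop_eq (fun pt => (pt.2, pt.1 - 1)) pv_mem1 percurso _ _ 0 hinv
  · exact pv_loop_eq (fun pt => (pt.2 - 1, pt.1)) pv_mem2 percurso _ _ 0 hinv
  · exact pv_loop_eq (fun pt => (pt.2 - 1, pt.1 - 1)) pv_mem3 percurso _ _ 0 hinv
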